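-- pv_equiv track=rewrite | github.com/wufangjie/leetcode | 660. Remove 9.py | newInteger
-- ===== SOURCE A (Python) =====
-- def newInteger(n):
--     """
--     :type n: int
--     :rtype: int
--     """
--     count = [9 ** i for i in range(10)]
--
--     ret = 0
--     i = 9
--     while n:
--         if n >= count[i]:
--             ret += (n // count[i]) * 10 ** i
--             n %= count[i]
--             # if n == 0:
--             #     break
--         i -= 1
--
--     return ret
-- ===== SOURCE B (Python) =====
-- def newInteger(n):
--     """
--     :type n: int
--     :rtype: int
--     """
--     ret = 0
--     place = 1
--     while n:
--         ret += (n % 9) * place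
--         n //= 9
--         place *= 10
--     return ret
-- ===== Notes on version B (the rewrite author's own statement) =====
-- stated objective: simpler
-- what changed: Replaces A's high-to-low greedy division against a precomputed table of powers 9**i by a standard least-significant-digit-first base-9 extraction (n % 9, n //= 9) with a running decimal place, needing no table.
import Mathlib
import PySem

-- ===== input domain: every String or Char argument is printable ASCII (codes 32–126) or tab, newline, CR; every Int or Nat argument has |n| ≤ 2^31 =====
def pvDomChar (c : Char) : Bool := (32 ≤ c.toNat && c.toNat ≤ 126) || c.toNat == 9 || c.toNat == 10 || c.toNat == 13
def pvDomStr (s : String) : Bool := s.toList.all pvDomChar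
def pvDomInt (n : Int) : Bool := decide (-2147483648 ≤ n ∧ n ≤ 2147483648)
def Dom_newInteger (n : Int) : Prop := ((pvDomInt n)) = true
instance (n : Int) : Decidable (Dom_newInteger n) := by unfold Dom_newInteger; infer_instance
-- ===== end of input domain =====

-- B replaces A's high-to-low greedy division against a table of powers 9**i by the
-- standard least-significant-digit-first base-9 extraction (n % 9, n //= 9) with a
-- running decimal place; objective: simpler (no table, one uniform loop step).

-- ===== PORT A =====
-- Python's `while n:` with `i` counting 9,8,…: ported with fuel f = i + 1 (start 10);
-- `count[i]` is the table entry 9 ** i, inlined here as (9:Int)^f since count = [9**i for i in range(10)].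
-- Fuel 0 (python i = -1) is unreachable inside Pre_ (after the i = 0 step n % 1 = 0 ends the loop).
def loopA : Nat → Int → Int → Int
  | 0, _, ret => ret
  | f+1, n, ret =>
    if n = 0 then ret
    else if (9:Int)^f ≤ n then
      loopA f (PySem.Int.mod n ((9:Int)^f)) (ret + PySem.Int.floordiv n ((9:Int)^f) * (10:Int)^f)
    else loopA f n ret

def newInteger (n : Int) : Int := loopA 10 n 0

-- ===== PORT B =====
-- Source B's while loop, fuel 11 suffices: inside Pre_/Dom, n < 9^10 so at most 10 divisions reach 0.
def loopB : Nat → Int → Int → Int → Int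
  | 0, _, _, ret => ret
  | f+1, n, place, ret =>
    if n = 0 then ret
    else loopB f (PySem.Int.floordiv n 9) (place * 10) (ret + PySem.Int.mod n 9 * place)

def newInteger_alt (n : Int) : Int := loopB 11 n 1 0

-- ===== PRECONDITION & SPEC =====
-- Pre_ excludes negative n, on which A raises IndexError (i runs off the bottom of the
-- count table); B's loop does not terminate there either (n //= 9 stalls at -1).
def Pre_newInteger (n : Int) : Prop := 0 ≤ n
instance (n : Int) : Decidable (Pre_newInteger n) := by unfold Pre_newInteger; infer_instance
def pvWitness_newInteger : Int := (80)

def Spec_newInteger (n : Int) (out : Int) : Prop := out = newInteger_alt n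
instance (n : Int) (out : Int) : Decidable (Spec_newInteger n out) := by unfold Spec_newInteger; infer_instance

-- ===== CLAIM (what is proved, stated in full; the proofs are below) =====
def Claim_equal_newInteger : Prop := ∀ (n : Int), Dom_newInteger n → Pre_newInteger n → Spec_newInteger n (newInteger n)

-- ===== LEMMAS AND PROOFS =====

-- the common value: the base-9 digits of m read as a decimal numeral
def pvVal (m : Nat) : Nat := Nat.ofDigits 10 (Nat.digits 9 m)

lemma pvVal_zero : pvVal 0 = 0 := by simp [pvVal]

lemma pvVal_pos (m : Nat) (hm : 0 < m) : pvVal m = m % 9 + 10 * pvVal (m / 9) := by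
  unfold pvVal
  rw [Nat.digits_def' (by norm_num : 1 < 9) hm, Nat.ofDigits_cons]

-- top digit of m < 9^(k+1)
lemma pvVal_split (k : Nat) : ∀ m : Nat, m < 9^(k+1) →
    pvVal m = pvVal (m % 9^k) + (m / 9^k) * 10^k := by
  induction k with
  | zero =>
    intro m hm
    simp only [pow_zero, Nat.mod_one, Nat.div_one, pvVal_zero, pow_zero, mul_one, Nat.zero_add]
    rcases Nat.eq_zero_or_pos m with h0 | h0
    · simp [h0, pvVal_zero]
    · rw [pvVal_pos m h0]
      have h9 : m % 9 = m := Nat.mod_eq_of_lt (by simpa using hm)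
      have hd : m / 9 = 0 := Nat.div_eq_of_lt (by simpa using hm)
      simp [h9, hd, pvVal_zero]
  | succ k ih =>
    intro m hm
    rcases Nat.eq_zero_or_pos m with h0 | h0
    · simp [h0, Nat.zero_mod, Nat.zero_div, pvVal_zero]
    have hdvd : (9:Nat) ∣ 9^(k+1) := dvd_pow_self 9 (by omega)
    have hmod9 : m % 9^(k+1) % 9 = m % 9 := Nat.mod_mod_of_dvd m hdvd
    have hpow : (9:Nat)^(k+1) = 9 * 9^k := by ring
    have hrd : m % 9^(k+1) / 9 = m / 9 % 9^k := by
      rw [hpow]; exact Nat.mod_mul_right_div_self m 9 (9^k)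
    have hdd : m / 9^(k+1) = m / 9 / 9^k := by
      rw [hpow, Nat.div_div_eq_div_mul]
    -- V (m % 9^(k+1)) = m % 9 + 10 * V (m/9 % 9^k)
    have hsub : pvVal (m % 9^(k+1)) = m % 9 + 10 * pvVal (m / 9 % 9^k) := by
      rcases Nat.eq_zero_or_pos (m % 9^(k+1)) with hr | hr
      · have h1 : m % 9 = 0 := by rw [← hmod9, hr]
        have h2 : m / 9 % 9^k = 0 := by rw [← hrd, hr]
        simp [hr, h1, h2, pvVal_zero]
      · rw [pvVal_pos _ hr, hmod9, hrd]
    have hdiv9 : m / 9 < 9^(k+1) := by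
      rw [Nat.div_lt_iff_lt_mul (by norm_num : 0 < 9)]
      calc m < 9^(k+1+1) := hm
        _ = 9^(k+1) * 9 := by ring
    have := ih (m / 9) hdiv9
    rw [pvVal_pos m h0, this, hsub, hdd]
    ring

lemma loopB_eq (f : Nat) : ∀ (m : Nat) (place ret : Int), m < 9^f →
    loopB (f+1) (m : Int) place ret = ret + place * (pvVal m : Int) := by
  induction f with
  | zero =>
    intro m place ret hm
    have : m = 0 := by omega
    simp [this, loopB, pvVal_zero]
  | succ f ih =>
    intro m place ret hm
    rcases Nat.eq_zero_or_pos m with h0 | h0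
    · simp [h0, loopB, pvVal_zero]
    have hne : (m : Int) ≠ 0 := by exact_mod_cast h0.ne'
    have hfd : PySem.Int.floordiv (m : Int) 9 = ((m / 9 : Nat) : Int) := by
      exact_mod_cast PySem.Int.floordiv_natCast m 9
    have hmd : PySem.Int.mod (m : Int) 9 = ((m % 9 : Nat) : Int) := by
      exact_mod_cast PySem.Int.mod_natCast m 9
    have hlt : m / 9 < 9^f := by
      rw [Nat.div_lt_iff_lt_mul (by norm_num : 0 < 9)]
      calc m < 9^(f+1) := hm
        _ = 9^f * 9 := by ring
    have hstep : loopB (f+1+1) (m : Int) place ret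
        = loopB (f+1) ((m / 9 : Nat) : Int) (place * 10) (ret + ((m % 9 : Nat) : Int) * place) := by
      rw [loopB, if_neg hne, hfd, hmd]
    rw [hstep, ih (m / 9) (place * 10) _ hlt, pvVal_pos m h0]
    push_cast
    ring

lemma loopA_eq (f : Nat) : ∀ (m : Nat) (ret : Int), m < 9^f →
    loopA f (m : Int) ret = ret + (pvVal m : Int) := by
  induction f with
  | zero =>
    intro m ret hm
    have : m = 0 := by omega
    simp [this, loopA, pvVal_zero]
  | succ f ih =>
    intro m ret hm
    rcases Nat.eq_zero_or_pos m with h0 | h0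
    · simp [h0, loopA, pvVal_zero]
    have hne : (m : Int) ≠ 0 := by exact_mod_cast h0.ne'
    have h9c : ((9:Int))^f = ((9^f : Nat) : Int) := by push_cast; ring
    by_cases hge : (9:Nat)^f ≤ m
    · have hgeI : (9:Int)^f ≤ (m : Int) := by rw [h9c]; exact_mod_cast hge
      have hfd : PySem.Int.floordiv (m : Int) ((9:Int)^f) = ((m / 9^f : Nat) : Int) := by
        rw [h9c]; exact_mod_cast PySem.Int.floordiv_natCast m (9^f)
      have hmd : PySem.Int.mod (m : Int) ((9:Int)^f) = ((m % 9^f : Nat) : Int) := by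
        rw [h9c]; exact_mod_cast PySem.Int.mod_natCast m (9^f)
      have hlt : m % 9^f < 9^f := Nat.mod_lt m (by positivity)
      have hstep : loopA (f+1) (m : Int) ret
          = loopA f ((m % 9^f : Nat) : Int) (ret + ((m / 9^f : Nat) : Int) * (10:Int)^f) := by
        rw [loopA, if_neg hne, if_pos hgeI, hfd, hmd]
      rw [hstep, ih _ _ hlt, pvVal_split f m hm]
      push_cast
      ring
    · have hltI : ¬ ((9:Int)^f ≤ (m : Int)) := by rw [h9c]; exact_mod_cast hge
      have hstep : loopA (f+1) (m : Int) ret = loopA f (m : Int) ret := by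
        rw [loopA, if_neg hne, if_neg hltI]
      rw [hstep, ih m ret (by omega)]

-- ===== VERDICT (by name: the statement is the Claim_ definition above) =====
theorem newInteger_spec : Claim_equal_newInteger := by
  intro n hdom hpre
  unfold Spec_newInteger newInteger newInteger_alt
  have hm : n = ((n.toNat : Nat) : Int) := (Int.toNat_of_nonneg hpre).symm
  have hb : n ≤ 2147483648 := by
    have := of_decide_eq_true hdom
    omega
  have h10 : n.toNat < 9^10 := by
    have : n.toNat ≤ 2147483648 := by omega
    calc n.toNat ≤ 2147483648 := this
      _ < 9^10 := by norm_num
  rw [hm, loopA_eq 10 n.toNat 0 h10, loopB_eq 10 n.toNat 1 0 h10]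
  ring
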